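-- pv_equiv track=rewrite | github.com/IorenzoLF/Le_Refuge | Le_refuge/arc_agi_refuge/solveurs_versions/solveur_arc_ameliore.py | _appliquer_transformation_constante
-- ===== SOURCE A (Python) =====
-- from typing import Dict, List, Any, Optional, Tuple, Set
--
-- def _appliquer_transformation_constante(test_input: List[List[int]],
--                                       transformations_positionnelles: List[Dict]) -> List[List[int]]:
--     """Appliquer une transformation constante"""
--     resultat = [ligne[:] for ligne in test_input]
--
--     for trans in transformations_positionnelles:
--         patterns = trans.get('patterns', {})
--
--         for key, value in patterns.items():
--             if key.startswith('constante_'):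
--                 val_in = int(key.split('_')[1])
--                 val_out = value
--
--                 # Appliquer la transformation
--                 for y, ligne in enumerate(resultat):
--                     for x, val in enumerate(ligne):
--                         if val == val_in:
--                             resultat[y][x] = val_out
--
--     return resultat
-- ===== SOURCE B (Python) =====
-- from typing import Dict, List
--
-- def _appliquer_transformation_constante(test_input: List[List[int]],
--                                       transformations_positionnelles: List[Dict]) -> List[List[int]]:
--     """Flatten the ordered 'constante_' patterns into one replacement-step
--     list, then compute each cell's final value independently in one grid pass
--     (valid because a whole-grid value replacement acts on each cell
--     independently)."""
--     steps = [(int(key.split('_')[1]), value)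
--              for trans in transformations_positionnelles
--              for key, value in trans.get('patterns', {}).items()
--              if key.startswith('constante_')]
--
--     def final(v):
--         for val_in, val_out in steps:
--             if v == val_in:
--                 v = val_out
--         return v
--
--     return [[final(v) for v in ligne] for ligne in test_input]
-- ===== Notes on version B (the rewrite author's own statement) =====
-- stated objective: simpler
-- what changed: Instead of one full-grid replacement pass per 'constante_' pattern, B first flattens all patterns into a single ordered step list and then computes each cell's final value independently by folding the steps over that cell in one grid pass.
import Mathlib
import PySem

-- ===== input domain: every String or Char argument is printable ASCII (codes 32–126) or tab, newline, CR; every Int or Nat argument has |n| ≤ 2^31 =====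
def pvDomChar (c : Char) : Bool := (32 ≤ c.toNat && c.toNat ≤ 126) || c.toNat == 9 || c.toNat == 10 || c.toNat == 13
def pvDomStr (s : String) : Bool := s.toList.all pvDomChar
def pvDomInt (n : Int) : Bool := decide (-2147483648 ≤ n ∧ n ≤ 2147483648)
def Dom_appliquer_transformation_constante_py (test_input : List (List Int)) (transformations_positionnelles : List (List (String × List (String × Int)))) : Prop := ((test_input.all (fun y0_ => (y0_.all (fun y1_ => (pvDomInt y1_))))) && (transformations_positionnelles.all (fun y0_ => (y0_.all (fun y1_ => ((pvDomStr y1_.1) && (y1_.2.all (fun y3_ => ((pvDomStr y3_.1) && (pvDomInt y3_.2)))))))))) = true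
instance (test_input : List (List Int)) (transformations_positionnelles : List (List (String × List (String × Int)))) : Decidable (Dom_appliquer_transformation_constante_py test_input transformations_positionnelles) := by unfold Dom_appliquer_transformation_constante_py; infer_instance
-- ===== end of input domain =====

-- B flattens the ordered 'constante_' patterns into one step list and computes each
-- cell's final value independently in a single grid pass (objective: simpler).

-- shared helpers: both Pythons contain `trans.get('patterns', {})` and
-- `int(key.split('_')[1])` verbatim
-- dict lookup with default = first match in the association list
def pvGetPatterns (trans : List (String × List (String × Int))) : List (String × Int) :=
  ((trans.find? (fun kv => kv.1 == "patterns")).map (·.2)).getD []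

-- int(key.split('_')[1]); the `.getD 0` is unreachable under Pre_ (int() would raise ValueError)
def pvValIn (key : String) : Int :=
  (PySem.Int.ofStr? (PySem.List.pyGetD ((PySem.Str.split? key "_").getD []) 1 "")).getD 0

-- ===== PORT A =====
def appliquer_transformation_constante_py (test_input : List (List Int)) (transformations_positionnelles : List (List (String × List (String × Int)))) : List (List Int) :=
  -- resultat = [ligne[:] for ligne in test_input]
  let resultat := test_input.map (fun ligne => ligne.map (fun v => v))
  transformations_positionnelles.foldl (fun resultat trans =>
    let patterns := pvGetPatterns trans
    patterns.foldl (fun resultat kv =>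
      if PySem.Str.startswith kv.1 "constante_" then
        let val_in := pvValIn kv.1
        -- the in-place write resultat[y][x] = val_out happens at the cell just read,
        -- so the nested enumerate loop is exactly an elementwise map
        resultat.map (fun ligne => ligne.map (fun v => if v = val_in then kv.2 else v))
      else resultat) resultat) resultat

-- ===== PORT B =====
def appliquer_transformation_constante_py_alt (test_input : List (List Int)) (transformations_positionnelles : List (List (String × List (String × Int)))) : List (List Int) :=
  -- the flattening comprehension building `steps`
  let steps : List (Int × Int) :=
    transformations_positionnelles.flatMap (fun trans =>
      ((pvGetPatterns trans).filter (fun kv => PySem.Str.startswith kv.1 "constante_")).map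
        (fun kv => (pvValIn kv.1, kv.2)))
  -- def final(v): for val_in, val_out in steps: if v == val_in: v = val_out
  let final := fun (v : Int) => steps.foldl (fun v p => if v = p.1 then p.2 else v) v
  test_input.map (fun ligne => ligne.map final)

-- ===== PRECONDITION & SPEC =====
-- Pre_ excludes exactly the inputs where Python A raises ValueError: a patterns key
-- 'constante_<s>' whose <s> (the piece after the first '_') is not int-parseable.
def Pre_appliquer_transformation_constante_py (test_input : List (List Int)) (transformations_positionnelles : List (List (String × List (String × Int)))) : Prop :=
  ∀ trans ∈ transformations_positionnelles, ∀ kv ∈ trans,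
    kv.1 = "patterns" → ∀ p ∈ kv.2, PySem.Str.startswith p.1 "constante_" = true →
      (PySem.Int.ofStr? (PySem.List.pyGetD ((PySem.Str.split? p.1 "_").getD []) 1 "")).isSome
instance (test_input : List (List Int)) (transformations_positionnelles : List (List (String × List (String × Int)))) : Decidable (Pre_appliquer_transformation_constante_py test_input transformations_positionnelles) := by unfold Pre_appliquer_transformation_constante_py; infer_instance

def pvWitness_appliquer_transformation_constante_py : List (List Int) × (List (List (String × List (String × Int)))) :=
  ([[1, 2], [0, 1]], [[("patterns", [("constante_1", 5), ("constante_2", 1)])]])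

def Spec_appliquer_transformation_constante_py (test_input : List (List Int)) (transformations_positionnelles : List (List (String × List (String × Int)))) (out : List (List Int)) : Prop := out = appliquer_transformation_constante_py_alt test_input transformations_positionnelles
instance (test_input : List (List Int)) (transformations_positionnelles : List (List (String × List (String × Int)))) (out : List (List Int)) : Decidable (Spec_appliquer_transformation_constante_py test_input transformations_positionnelles out) := by unfold Spec_appliquer_transformation_constante_py; infer_instance

-- ===== CLAIM (what is proved, stated in full; the proofs are below) =====
def Claim_equal_appliquer_transformation_constante_py : Prop := ∀ (test_input : List (List Int)) (transformations_positionnelles : List (List (String × List (String × Int)))), Dom_appliquer_transformation_constante_py test_input transformations_positionnelles → Pre_appliquer_transformation_constante_py test_input transformations_positionnelles → Spec_appliquer_transformation_constante_py test_input transformations_positionnelles (appliquer_transformation_constante_py test_input transformations_positionnelles)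

-- ===== LEMMAS AND PROOFS =====

-- one whole-grid replacement step, as A performs it
def pvGStep (g : List (List Int)) (p : Int × Int) : List (List Int) :=
  g.map (fun ligne => ligne.map (fun v => if v = p.1 then p.2 else v))

-- A's inner fold over a pattern list = fold of pvGStep over the filtered/mapped steps
lemma pvInner_as_steps (pats : List (String × Int)) (g : List (List Int)) :
    pats.foldl (fun resultat kv =>
      if PySem.Str.startswith kv.1 "constante_" then
        let val_in := pvValIn kv.1
        resultat.map (fun ligne => ligne.map (fun v => if v = val_in then kv.2 else v))
      else resultat) g
    = ((pats.filter (fun kv => PySem.Str.startswith kv.1 "constante_")).map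
        (fun kv => (pvValIn kv.1, kv.2))).foldl pvGStep g := by
  induction pats generalizing g with
  | nil => rfl
  | cons kv rest ih =>
    by_cases h : PySem.Str.startswith kv.1 "constante_" = true
    · rw [List.foldl_cons, if_pos h, List.filter_cons, if_pos h, List.map_cons,
        List.foldl_cons, ih]
      rfl
    · rw [List.foldl_cons, if_neg h, List.filter_cons, if_neg h, ih]

-- A's double fold = one fold of pvGStep over the flattened step list
lemma pvA_as_steps (tps : List (List (String × List (String × Int)))) (g : List (List Int)) :
    tps.foldl (fun resultat trans =>
      let patterns := pvGetPatterns trans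
      patterns.foldl (fun resultat kv =>
        if PySem.Str.startswith kv.1 "constante_" then
          let val_in := pvValIn kv.1
          resultat.map (fun ligne => ligne.map (fun v => if v = val_in then kv.2 else v))
        else resultat) resultat) g
    = (tps.flatMap (fun trans =>
        ((pvGetPatterns trans).filter (fun kv => PySem.Str.startswith kv.1 "constante_")).map
          (fun kv => (pvValIn kv.1, kv.2)))).foldl pvGStep g := by
  induction tps generalizing g with
  | nil => rfl
  | cons trans rest ih =>
    simp only [List.foldl_cons, List.flatMap_cons, List.foldl_append]
    rw [← ih, pvInner_as_steps]

-- grid-level folding of whole-grid replacements = cell-level folding (cells are independent)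
lemma pvSteps_commute (steps : List (Int × Int)) (g : List (List Int)) :
    steps.foldl pvGStep g
      = g.map (fun ligne => ligne.map (fun v =>
          steps.foldl (fun v p => if v = p.1 then p.2 else v) v)) := by
  induction steps generalizing g with
  | nil => simp
  | cons p rest ih =>
    simp only [List.foldl_cons]
    rw [ih]
    unfold pvGStep
    simp

-- ===== VERDICT (by name: the statement is the Claim_ definition above) =====
theorem appliquer_transformation_constante_py_spec : Claim_equal_appliquer_transformation_constante_py := by
  intro ti tps _ _
  unfold Spec_appliquer_transformation_constante_py appliquer_transformation_constante_py
    appliquer_transformation_constante_py_alt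
  rw [pvA_as_steps, pvSteps_commute]
  simp
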